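-- pv_equiv track=rewrite | github.com/habibimazin/COP3502_Lab4 | numeric_conversion.py | hex_string_decode
-- ===== SOURCE A (Python) =====
-- def hex_string_decode(hex):
--     #get rid of 0x prefix
--     if hex[0:2] == '0x':
--         hex = hex[2:]
--
--
--     bit_index = len(hex) - 1
--     total = 0
--
--     for digit in hex:
--         total += hex_char_decode(digit) * pow(16, bit_index)
--         bit_index -= 1
--     return total
--
-- def hex_char_decode(digit):
--    val = ["0", "1", "2", "3", "4", "5", "6", "7", "8", "9", "A", "B", "C", "D", "E", "F"]
--    return val.index(digit.upper())
-- ===== SOURCE B (Python) =====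
-- def hex_string_decode(hex):
--     # get rid of 0x prefix
--     if hex[0:2] == '0x':
--         hex = hex[2:]
--     total = 0
--     for digit in hex:
--         total = total * 16 + hex_char_decode(digit)
--     return total
--
-- def hex_char_decode(digit):
--     c = digit.lower()
--     if '0' <= c <= '9':
--         return ord(c) - ord('0')
--     if 'a' <= c <= 'f':
--         return ord(c) - ord('a') + 10
--     raise ValueError(f"{digit!r} is not a hex digit")
-- ===== Notes on version B (the rewrite author's own statement) =====
-- stated objective: faster
-- what changed: Replaced the positional sum (bit_index counter, a fresh 16**bit_index big power per digit, list.index char lookup) by a Horner accumulator total = total*16 + digit with the hex digit decoded by code-point arithmetic.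
import Mathlib
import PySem

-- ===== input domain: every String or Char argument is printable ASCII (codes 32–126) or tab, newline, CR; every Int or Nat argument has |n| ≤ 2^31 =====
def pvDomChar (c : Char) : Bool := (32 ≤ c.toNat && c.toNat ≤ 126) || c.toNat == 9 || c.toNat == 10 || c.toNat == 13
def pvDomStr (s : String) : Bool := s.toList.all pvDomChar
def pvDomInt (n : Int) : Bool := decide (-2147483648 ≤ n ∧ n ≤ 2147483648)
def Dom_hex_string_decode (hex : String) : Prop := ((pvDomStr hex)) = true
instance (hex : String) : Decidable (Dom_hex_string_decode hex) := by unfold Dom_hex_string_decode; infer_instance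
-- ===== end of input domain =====

-- B replaces the positional-power loop (16^bit_index per digit) with a single Horner accumulator
-- and replaces the list.index char lookup with code-point arithmetic; return values agree on Pre_.

-- ===== PORT A =====
-- hex_char_decode: val.index(digit.upper()); Python raises ValueError when absent — those inputs are outside Pre_
def hexCharDecodeA (digit : Char) : Int :=
  let val : List Char := ['0','1','2','3','4','5','6','7','8','9','A','B','C','D','E','F']
  (((PySem.List.index? val (PySem.Chars.upperChar digit)).getD 0 : Nat) : Int)

def hex_string_decode (hex : String) : Int :=
  let cs : List Char :=
    if PySem.List.slice hex.toList (some 0) (some 2) = ['0','x'] then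
      PySem.List.slice hex.toList (some 2) none
    else hex.toList
  -- bit_index = len(hex) - 1; total = 0; for digit: total += dec(digit) * 16 ** bit_index; bit_index -= 1
  (cs.foldl (fun (st : Int × Int) digit =>
      (st.1 - 1, st.2 + hexCharDecodeA digit * (16 : Int) ^ st.1.toNat))
    ((cs.length : Int) - 1, 0)).2

-- ===== PORT B =====
-- arithmetic char decode; Python raises ValueError on a non-hex char — outside Pre_
def hexCharDecodeB (digit : Char) : Int :=
  let c := PySem.Chars.lowerChar digit
  if '0' ≤ c ∧ c ≤ '9' then (c.toNat : Int) - 48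
  else if 'a' ≤ c ∧ c ≤ 'f' then (c.toNat : Int) - 87
  else 0

def hex_string_decode_alt (hex : String) : Int :=
  let cs : List Char :=
    if PySem.List.slice hex.toList (some 0) (some 2) = ['0','x'] then
      PySem.List.slice hex.toList (some 2) none
    else hex.toList
  cs.foldl (fun total digit => total * 16 + hexCharDecodeB digit) 0

-- ===== PRECONDITION & SPEC =====
def pvHexDigits : List Char :=
  ['0','1','2','3','4','5','6','7','8','9','a','b','c','d','e','f','A','B','C','D','E','F']

-- Pre_ excludes exactly the inputs where A raises ValueError: a non-hex character after the optional 0x prefix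
def Pre_hex_string_decode (hex : String) : Prop :=
  (let cs : List Char :=
    if PySem.List.slice hex.toList (some 0) (some 2) = ['0','x'] then
      PySem.List.slice hex.toList (some 2) none
    else hex.toList
   cs.all (fun c => pvHexDigits.contains c)) = true
instance (hex : String) : Decidable (Pre_hex_string_decode hex) := by unfold Pre_hex_string_decode; infer_instance

def pvWitness_hex_string_decode : String := "0x1A3f"

def Spec_hex_string_decode (hex : String) (out : Int) : Prop := out = hex_string_decode_alt hex
instance (hex : String) (out : Int) : Decidable (Spec_hex_string_decode hex out) := by unfold Spec_hex_string_decode; infer_instance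

-- ===== CLAIM (what is proved, stated in full; the proofs are below) =====
def Claim_equal_hex_string_decode : Prop := ∀ (hex : String), Dom_hex_string_decode hex → Pre_hex_string_decode hex → Spec_hex_string_decode hex (hex_string_decode hex)

-- ===== LEMMAS AND PROOFS =====

-- the two character decoders agree on every hex digit
set_option maxRecDepth 10000 in
lemma decode_agree : ∀ c ∈ pvHexDigits, hexCharDecodeA c = hexCharDecodeB c := by
  intro c hc
  fin_cases hc <;> decide

-- Horner fold with an arbitrary start value
lemma horner_shift (cs : List Char) : ∀ (a : Int),
    cs.foldl (fun total digit => total * 16 + hexCharDecodeB digit) a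
      = a * (16 : Int) ^ cs.length + cs.foldl (fun total digit => total * 16 + hexCharDecodeB digit) 0 := by
  induction cs with
  | nil => intro a; simp
  | cons d rest ih =>
    intro a
    simp only [List.foldl_cons, List.length_cons]
    rw [ih (a * 16 + hexCharDecodeB d), ih (0 * 16 + hexCharDecodeB d)]
    ring

-- A's positional loop equals B's Horner loop on hex-digit lists
lemma loop_agree (cs : List Char) : ∀ (t : Int), (∀ c ∈ cs, c ∈ pvHexDigits) →
    (cs.foldl (fun (st : Int × Int) digit =>
        (st.1 - 1, st.2 + hexCharDecodeA digit * (16 : Int) ^ st.1.toNat))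
      ((cs.length : Int) - 1, t)).2
    = t + cs.foldl (fun total digit => total * 16 + hexCharDecodeB digit) 0 := by
  induction cs with
  | nil => intro t _; simp
  | cons d rest ih =>
    intro t h
    have hd : hexCharDecodeA d = hexCharDecodeB d := decode_agree d (h d (by simp))
    have hrest : ∀ c ∈ rest, c ∈ pvHexDigits := fun c hc => h c (List.mem_cons_of_mem _ hc)
    simp only [List.foldl_cons, List.length_cons]
    rw [show ((rest.length + 1 : Nat) : Int) - 1 = (rest.length : Int) by push_cast; ring]
    rw [Int.toNat_natCast]
    rw [ih (t + hexCharDecodeA d * (16 : Int) ^ rest.length) hrest]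
    rw [horner_shift rest (0 * 16 + hexCharDecodeB d), hd]
    ring

-- ===== VERDICT (by name: the statement is the Claim_ definition above) =====
theorem hex_string_decode_spec : Claim_equal_hex_string_decode := by
  intro hex _ hpre
  unfold Spec_hex_string_decode hex_string_decode hex_string_decode_alt
  unfold Pre_hex_string_decode at hpre
  simp only at hpre ⊢
  set cs : List Char :=
    if PySem.List.slice hex.toList (some 0) (some 2) = ['0','x'] then
      PySem.List.slice hex.toList (some 2) none
    else hex.toList with hcs
  have hmem : ∀ c ∈ cs, c ∈ pvHexDigits := by
    intro c hc
    have := List.all_eq_true.mp hpre c hc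
    simpa [List.contains_iff_mem] using this
  simpa using loop_agree cs 0 hmem
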